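-- pv_equiv track=rewrite | github.com/KirillTregubov/SoundInsights | backend/src/methods.py | __recommend_using_ml
-- ===== SOURCE A (Python) =====
-- from typing import List, Optional
--
-- def __recommend_using_ml(track_uris: List[str], max_ml_calls: Optional[int]) -> List[str]:
--     """
--     Return a list of track_uris recommended by the ML model given the input "track_uris".
--     The ML model will be called a maximum of "max_ml_calls" times. If this value is None, the
--     maximum allowed ML model calls of 100 will be used (not recommended).
--
--     Preconditions:
--     - max_ml_calls is None or 0 < max_ml_calls <= 100
--     Postconditions:
--     - returns a list of len == 100
--     """
--     segmented = __segment_list(track_uris, 10)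
--     if len(segmented) == 0:
--         return []
--     recommended = []
--     num_loops = min(len(segmented), 100 if max_ml_calls is None else max_ml_calls)
--     for i in range(num_loops):
--         segment = segmented[i]
--         # TODO: Run ML model on "segment" and extend the "recommended" list by
--         # the first 100 / min(len(segmented), max_ml_calls) items of the list returned by the ML model.
--         recommended.extend(["0UaMYEvWZi0ZqiDOoHU3YI", "6I9VzXrHxO9rA9A5euc8Ak"])
--     # TODO: assert len(recommended) should be 100
--     return recommended
--
-- def __segment_list(lst: List, length: int) -> List[List]:
--     """
--     Segment the given lst into nested lists each with at most "length" elements. Each nested list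
--     will have "length" elements EXCEPT for the last one which will have the left over len(lst) % length
--     elements. If "length" divides len(lst), then the last nested list will also have "length" elements.
--
--     Preconditions:
--     - length >= 1
--     Postconditions:
--     - If len(lst) % length == 0, each nested list in the returned list will have "length" elements.
--       Otherwise, the last nested list in the returned list has len == len(lst) % length while
--       every other list has "length" elements.
--     """
--     segmented = []
--     current = []
--     for item in lst:
--         current.append(item)
--         if (len(current) == length):
--             segmented.append(current)
--             current = []
--     if len(current) > 0:
--         segmented.append(current)
--     return segmented
-- ===== SOURCE B (Python) =====
-- from typing import List, Optional
--
-- def __recommend_using_ml(track_uris: List[str], max_ml_calls: Optional[int]) -> List[str]: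
--     n = len(track_uris)
--     if n == 0:
--         return []
--     num_segments = (n + 9) // 10
--     cap = 100 if max_ml_calls is None else max_ml_calls
--     num_loops = min(num_segments, cap)
--     return ["0UaMYEvWZi0ZqiDOoHU3YI", "6I9VzXrHxO9rA9A5euc8Ak"] * num_loops
-- ===== Notes on version B (the rewrite author's own statement) =====
-- stated objective: simpler
-- what changed: Replaces the segmentation traversal and the indexed append loop by closed-form arithmetic (num_segments = (n+9)//10) and list multiplication.
import Mathlib
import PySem

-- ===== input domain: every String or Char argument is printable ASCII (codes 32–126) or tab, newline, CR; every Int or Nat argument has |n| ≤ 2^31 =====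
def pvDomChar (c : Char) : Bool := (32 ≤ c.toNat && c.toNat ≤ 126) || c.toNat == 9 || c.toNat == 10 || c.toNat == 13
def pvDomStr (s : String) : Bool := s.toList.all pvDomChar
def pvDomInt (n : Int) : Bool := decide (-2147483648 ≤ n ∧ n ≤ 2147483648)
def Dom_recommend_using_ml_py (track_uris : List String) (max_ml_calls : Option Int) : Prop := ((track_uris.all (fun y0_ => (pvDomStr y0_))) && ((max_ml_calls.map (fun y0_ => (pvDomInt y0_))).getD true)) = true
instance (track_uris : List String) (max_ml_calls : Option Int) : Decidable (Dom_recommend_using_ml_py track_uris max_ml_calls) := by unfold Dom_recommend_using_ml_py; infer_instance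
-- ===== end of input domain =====

-- Simpler B: closed-form segment count (n+9)//10 and list multiplication replace A's
-- segmentation traversal and indexed append loop.

-- ===== PORT A =====
-- helper __segment_list (length fixed to 10 at the call site, ported with its parameter)
def pvSegStep (length : Int) (st : List (List String) × List String) (item : String) : List (List String) × List String :=
  let current := st.2 ++ [item]
  if (current.length : Int) == length then (st.1 ++ [current], []) else (st.1, current)

def pvSegmentList (lst : List String) (length : Int) : List (List String) :=
  let st := lst.foldl (pvSegStep length) ([], [])
  if st.2.length > 0 then st.1 ++ [st.2] else st.1

def recommend_using_ml_py (track_uris : List String) (max_ml_calls : Option Int) : List String :=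
  let segmented := pvSegmentList track_uris 10
  if segmented.length == 0 then []
  else
    let num_loops : Int := min (segmented.length : Int) (match max_ml_calls with | none => 100 | some v => v)
    (PySem.List.pyRange 0 num_loops 1).foldl (fun acc i =>
      -- segmented[i]: i < num_loops ≤ len(segmented), always in range, so pyGetD is exact here
      let _segment := PySem.List.pyGetD segmented i []
      acc ++ ["0UaMYEvWZi0ZqiDOoHU3YI", "6I9VzXrHxO9rA9A5euc8Ak"]) []

-- ===== PORT B =====
def recommend_using_ml_py_alt (track_uris : List String) (max_ml_calls : Option Int) : List String :=
  let n : Int := track_uris.length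
  if n == 0 then []
  else
    let num_segments := PySem.Int.floordiv (n + 9) 10
    let cap : Int := match max_ml_calls with | none => 100 | some v => v
    let num_loops := min num_segments cap
    -- list * int: empty for non-positive multiplier, hence toNat
    (List.replicate num_loops.toNat ["0UaMYEvWZi0ZqiDOoHU3YI", "6I9VzXrHxO9rA9A5euc8Ak"]).flatten

-- ===== PRECONDITION & SPEC =====
def Spec_recommend_using_ml_py (track_uris : List String) (max_ml_calls : Option Int) (out : List String) : Prop := out = recommend_using_ml_py_alt track_uris max_ml_calls
instance (track_uris : List String) (max_ml_calls : Option Int) (out : List String) : Decidable (Spec_recommend_using_ml_py track_uris max_ml_calls out) := by unfold Spec_recommend_using_ml_py; infer_instance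

-- ===== CLAIM =====
def Claim_equal_recommend_using_ml_py : Prop := ∀ (track_uris : List String) (max_ml_calls : Option Int), Dom_recommend_using_ml_py track_uris max_ml_calls → Spec_recommend_using_ml_py track_uris max_ml_calls (recommend_using_ml_py track_uris max_ml_calls)

-- ===== LEMMAS AND PROOFS =====
-- segmentation invariant: with current shorter than 10, the final segment count is
-- old count plus ceil((|current| + |rest|)/10)
theorem pvSegLen (lst : List String) : ∀ (seg : List (List String)) (cur : List String), cur.length < 10 →
    (let st := lst.foldl (pvSegStep 10) (seg, cur);
     (if st.2.length > 0 then st.1 ++ [st.2] else st.1).length)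
      = seg.length + (cur.length + lst.length + 9) / 10 := by
  induction lst with
  | nil =>
    intro seg cur h
    simp only [List.foldl_nil]
    by_cases hc : cur.length > 0
    · simp only [if_pos hc, List.length_append, List.length_singleton, List.length_nil]
      omega
    · simp only [if_neg hc, List.length_nil]
      omega
  | cons a xs ih =>
    intro seg cur h
    simp only [List.foldl_cons, pvSegStep]
    by_cases h10 : ((cur ++ [a]).length : Int) == 10
    · simp only [if_pos h10]
      have h9 : cur.length = 9 := by
        simp only [beq_iff_eq, List.length_append, List.length_singleton] at h10
        omega
      rw [ih (seg ++ [cur ++ [a]]) [] (by simp)]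
      simp only [List.length_append, List.length_cons, List.length_nil]
      omega
    · simp only [if_neg h10]
      have hlt : (cur ++ [a]).length < 10 := by
        simp only [beq_iff_eq, List.length_append, List.length_singleton] at h10 ⊢
        omega
      rw [ih seg (cur ++ [a]) hlt]
      simp only [List.length_append, List.length_cons, List.length_nil]
      omega

theorem pvSegmentList_length (lst : List String) :
    (pvSegmentList lst 10).length = (lst.length + 9) / 10 := by
  have := pvSegLen lst [] [] (by simp)
  simpa [pvSegmentList] using this

-- generic form actually used (fold body ignores the index)
theorem pvFoldConstAppend' (P : List String) (g : List Int) (acc : List String)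
    (f : List String → Int → List String) (hf : ∀ a i, f a i = a ++ P) :
    g.foldl f acc = acc ++ (List.replicate g.length P).flatten := by
  induction g generalizing acc with
  | nil => simp
  | cons x xs ih => simp [hf, ih, List.replicate_succ]

-- ===== VERDICT =====
theorem recommend_using_ml_py_spec : Claim_equal_recommend_using_ml_py := by
  intro tu m _
  unfold Spec_recommend_using_ml_py recommend_using_ml_py recommend_using_ml_py_alt
  simp only []
  by_cases hnil : tu = []
  · subst hnil; simp [pvSegmentList]
  · have hn : tu.length > 0 := List.length_pos_of_ne_nil hnil
    have hseg : (pvSegmentList tu 10).length = (tu.length + 9) / 10 := pvSegmentList_length tu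
    have hsegpos : (pvSegmentList tu 10).length ≠ 0 := by omega
    rw [if_neg (by simpa using hsegpos), if_neg (by simp; omega)]
    rw [pvFoldConstAppend' _ _ _ _ (fun a i => rfl)]
    have hfd : PySem.Int.floordiv ((tu.length : Int) + 9) 10 = (((tu.length + 9) / 10 : Nat) : Int) := by
      have := PySem.Int.floordiv_natCast (tu.length + 9) 10
      push_cast at this ⊢
      exact_mod_cast this
    rw [hfd, hseg]
    rw [PySem.List.pyRange_one, List.length_map, List.length_range]
    simp
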